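-- pv_equiv track=rewrite | github.com/bArryAllen6843/Data-Structure-and-Algorithm | ARRAY/915-partitionArrayIntoDisjointIntervals.py | partitionDisjoint
-- ===== SOURCE A (Python) =====
-- def partitionDisjoint(nums) -> int:
--     disjoint = 0
--     max_left = nums[0]
--     max_so_far = nums[0]
--
--     # if out next element is smaller than max_left it means that element should be included in left array
--     # so shift the disjoint to that index and disjoint+1 as starting index is 0 not 1
--     for i, val in enumerate(nums):
--         max_so_far = max(max_so_far, val)
--         if max_left > val:
--             disjoint = i
--             max_left = max_so_far
--     return disjoint + 1
-- ===== SOURCE B (Python) =====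
-- def partitionDisjoint(nums) -> int:
--     n = len(nums)
--     right_min = nums[:]          # right_min[i] = min(nums[i:]) after the backward pass
--     for i in range(n - 2, -1, -1):
--         right_min[i] = min(right_min[i], right_min[i + 1])
--     left_max = nums[0]           # raises IndexError on empty input, like A
--     for i in range(n - 1):
--         left_max = max(left_max, nums[i])
--         if left_max <= right_min[i + 1]:
--             return i + 1
--     return n
-- ===== Notes on version B (the rewrite author's own statement) =====
-- stated objective: alternative
-- what changed: Replaces A's single-pass lagging-max trick (disjoint/max_left/max_so_far state) with the classic two-table method: a suffix-minimum array built right-to-left, then a prefix-maximum scan that returns at the first split point where prefix max <= suffix min.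
import Mathlib
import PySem

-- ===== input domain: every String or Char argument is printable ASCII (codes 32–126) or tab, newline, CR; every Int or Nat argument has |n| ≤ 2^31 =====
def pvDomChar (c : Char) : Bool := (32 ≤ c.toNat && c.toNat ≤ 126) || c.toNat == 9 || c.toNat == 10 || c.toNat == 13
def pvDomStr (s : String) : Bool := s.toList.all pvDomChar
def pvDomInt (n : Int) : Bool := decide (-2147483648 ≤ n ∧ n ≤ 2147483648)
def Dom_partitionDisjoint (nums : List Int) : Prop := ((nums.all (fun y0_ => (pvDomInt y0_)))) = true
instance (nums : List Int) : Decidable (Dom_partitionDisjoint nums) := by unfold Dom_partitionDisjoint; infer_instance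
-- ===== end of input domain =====

-- B replaces A's single-pass lagging-max scan by a suffix-min table plus a prefix-max
-- scan returning at the first valid split (alternative algorithm, same O(n) cost).
-- Both raise IndexError on the empty list (excluded by Pre_).

-- ===== PORT A =====
-- the 'for i, val in enumerate(nums)' loop over state (disjoint, max_left, max_so_far)
def pdLoopA : List Int → Nat → Int × Int × Int → Int × Int × Int
  | [], _, s => s
  | v :: u, i, (d, ml, ms) =>
    let ms' := max ms v
    if ml > v then pdLoopA u (i + 1) ((i : Int), ms', ms')
    else pdLoopA u (i + 1) (d, ml, ms')

def partitionDisjoint (nums : List Int) : Int :=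
  match nums with
  | [] => 0   -- unreachable under Pre_: Python A raises IndexError on nums[0]
  | x :: _ => (pdLoopA nums 0 (0, x, x)).1 + 1

-- ===== PORT B =====
-- backward pass of Source B: right_min[i] = min(nums[i], right_min[i+1])
def rightMins : List Int → List Int
  | [] => []
  | v :: u =>
    match rightMins u with
    | [] => [v]
    | m :: r => min v m :: m :: r

-- forward pass of Source B: for i in range(n-1), pairing nums[i] with right_min[i+1]
def pdScanB : Int → Nat → List Int → List Int → Nat → Int
  | lm, i, v :: vs, r :: rms, n =>
    let lm' := max lm v
    if lm' ≤ r then (i : Int) + 1 else pdScanB lm' (i + 1) vs rms n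
  | _, _, _, _, n => (n : Int)

def partitionDisjoint_alt (nums : List Int) : Int :=
  match nums with
  | [] => 0   -- unreachable under Pre_: Python B raises IndexError on nums[0]
  | x :: _ => pdScanB x 0 nums (rightMins nums).tail nums.length

-- ===== PRECONDITION & SPEC =====
-- Pre_ excludes only the empty list, on which both Pythons raise IndexError (nums[0]).
def Pre_partitionDisjoint (nums : List Int) : Prop := nums ≠ []
instance (nums : List Int) : Decidable (Pre_partitionDisjoint nums) := by
  unfold Pre_partitionDisjoint; infer_instance
def pvWitness_partitionDisjoint : List Int := [5, 0, 3, 8, 6]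

def Spec_partitionDisjoint (nums : List Int) (out : Int) : Prop := out = partitionDisjoint_alt nums
instance (nums : List Int) (out : Int) : Decidable (Spec_partitionDisjoint nums out) := by unfold Spec_partitionDisjoint; infer_instance

-- ===== CLAIM (what is proved, stated in full; the proofs are below) =====
def Claim_equal_partitionDisjoint : Prop := ∀ (nums : List Int), Dom_partitionDisjoint nums → Pre_partitionDisjoint nums → Spec_partitionDisjoint nums (partitionDisjoint nums)

-- ===== LEMMAS AND PROOFS =====

-- one-step unfolding lemmas (definitional)
lemma pdLoopA_cons (v : Int) (u : List Int) (i : Nat) (d ml ms : Int) :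
    pdLoopA (v :: u) i (d, ml, ms) =
      if ml > v then pdLoopA u (i + 1) ((i : Int), max ms v, max ms v)
      else pdLoopA u (i + 1) (d, ml, max ms v) := rfl

lemma pdScanB_cons (lm : Int) (i : Nat) (v : Int) (vs : List Int) (r : Int)
    (rms : List Int) (n : Nat) :
    pdScanB lm i (v :: vs) (r :: rms) n =
      if max lm v ≤ r then (i : Int) + 1 else pdScanB (max lm v) (i + 1) vs rms n := rfl

lemma pdScanB_nilr (lm : Int) (i : Nat) (vs : List Int) (n : Nat) :
    pdScanB lm i vs [] n = (n : Int) := by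
  cases vs <;> rfl

lemma rightMins_cons (v : Int) (u : List Int) :
    rightMins (v :: u) =
      match rightMins u with
      | [] => [v]
      | m :: r => min v m :: m :: r := rfl

-- the tail of the suffix-min list of (v :: u) is the suffix-min list of u
lemma rightMins_tail (v : Int) (u : List Int) : (rightMins (v :: u)).tail = rightMins u := by
  rw [rightMins_cons]
  cases h : rightMins u with
  | nil => simp
  | cons m r => simp

-- the head of the suffix-min list of a nonempty list is its minimum (a member and a lower bound)
lemma rightMins_spec : ∀ (u : List Int), u ≠ [] →
    ∃ m r, rightMins u = m :: r ∧ m ∈ u ∧ ∀ w ∈ u, m ≤ w := by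
  intro u
  induction u with
  | nil => intro h; exact absurd rfl h
  | cons v u ih =>
    intro _
    cases u with
    | nil => exact ⟨v, [], by rw [rightMins_cons]; rfl, by simp, by simp⟩
    | cons w u' =>
      obtain ⟨m, r, hrm, hmem, hbd⟩ := ih (by simp)
      refine ⟨min v m, m :: r, by rw [rightMins_cons, hrm], ?_, ?_⟩
      · rcases le_total v m with h | h
        · simp [min_eq_left h]
        · rw [min_eq_right h]
          exact List.mem_cons_of_mem v hmem
      · intro x hx
        rcases List.mem_cons.mp hx with h | h
        · subst h; exact min_le_left _ _
        · exact le_trans (min_le_right _ _) (hbd x h)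

-- if no remaining element is below max_left, A's loop never moves disjoint
lemma pdLoopA_fst : ∀ (u : List Int) (i : Nat) (d ml ms : Int),
    (∀ w ∈ u, ¬ ml > w) → (pdLoopA u i (d, ml, ms)).1 = d := by
  intro u
  induction u with
  | nil => intro i d ml ms _; rfl
  | cons v u ih =>
    intro i d ml ms h
    have hv : ¬ ml > v := h v (by simp)
    rw [pdLoopA_cons, if_neg hv]
    exact ih (i + 1) d ml (max ms v) (fun w hw => h w (by simp [hw]))

-- helper naming the suffix-min list that B's scan pairs with the suffix starting at v
def rmTail : List Int → List Int
  | [] => []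
  | _ :: u => rightMins u

-- main invariant: while some remaining element lies below max_left, A's running state
-- (d, ml, lm) (lm = prefix max so far = B's left_max) yields the same answer as B's scan
lemma pdAB : ∀ (u : List Int) (i : Nat) (d ml lm : Int) (n : Nat),
    i + u.length = n → d < (i : Int) → ml ≤ lm → (∃ w ∈ u, w < ml) →
    (pdLoopA u i (d, ml, lm)).1 + 1 = pdScanB lm i u (rmTail u) n := by
  intro u
  induction u with
  | nil => intro i d ml lm n _ _ _ hw; simp at hw
  | cons v u' ih =>
    intro i d ml lm n hlen hd hml hw
    cases u' with
    | nil =>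
      -- last element: B's rms is empty, B returns n = i+1; A updates d := i
      have hv : ml > v := by
        obtain ⟨w, hwm, hwlt⟩ := hw; simp at hwm; exact hwm ▸ hwlt
      have hn : (i : Int) + 1 = (n : Int) := by
        simp at hlen; omega
      rw [pdLoopA_cons, if_pos hv]
      show ((i : Int), max lm v, max lm v).1 + 1 = pdScanB lm i [v] (rmTail [v]) n
      rw [show rmTail [v] = [] from rfl, pdScanB_nilr]
      exact hn
    | cons w u'' =>
      obtain ⟨m, r, hrm, hmem, hbd⟩ := rightMins_spec (w :: u'') (by simp)
      have hrt : rmTail (w :: u'') = r := by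
        have h1 := rightMins_tail w u''
        rw [hrm] at h1
        simpa [rmTail] using h1.symm
      rw [show rmTail (v :: w :: u'') = rightMins (w :: u'') from rfl, hrm,
        pdScanB_cons, pdLoopA_cons]
      by_cases hs : max lm v ≤ m
      · -- B returns i+1 here; A's disjoint must already be / become i
        rw [if_pos hs]
        by_cases hv : ml > v
        · -- A sets disjoint := i, and no later element moves it again
          rw [if_pos hv]
          rw [pdLoopA_fst _ _ _ _ _ (fun x hx => by
            have := le_trans hs (hbd x hx); omega)]
        · -- impossible: the witness below ml would be below the suffix min
          exfalso
          obtain ⟨w0, hwm, hwlt⟩ := hw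
          rcases List.mem_cons.mp hwm with h | h
          · subst h; omega
          · have h1 := hbd w0 h
            have h2 : lm ≤ max lm v := le_max_left _ _
            omega
      · -- B recurses; so does A, with the invariant re-established
        rw [if_neg hs]
        by_cases hv : ml > v
        · rw [if_pos hv]
          have := ih (i + 1) (i : Int) (max lm v) (max lm v) n
            (by simp at hlen ⊢; omega) (by push_cast; omega) le_rfl
            ⟨m, hmem, by omega⟩
          rw [hrt] at this
          simpa using this
        · rw [if_neg hv]
          have hw' : ∃ w0 ∈ (w :: u''), w0 < ml := by
            obtain ⟨w0, hwm, hwlt⟩ := hw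
            rcases List.mem_cons.mp hwm with h | h
            · subst h; omega
            · exact ⟨w0, h, hwlt⟩
          have := ih (i + 1) d ml (max lm v) n
            (by simp at hlen ⊢; omega) (by push_cast; omega)
            (le_trans hml (le_max_left _ _)) hw'
          rw [hrt] at this
          simpa using this

-- ===== VERDICT (by name: the statement is the Claim_ definition above) =====
theorem partitionDisjoint_spec : Claim_equal_partitionDisjoint := by
  unfold Claim_equal_partitionDisjoint
  intro nums _ hpre
  unfold Spec_partitionDisjoint
  match nums with
  | [] => exact absurd rfl hpre
  | x :: t =>
    show (pdLoopA (x :: t) 0 (0, x, x)).1 + 1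
        = pdScanB x 0 (x :: t) (rightMins (x :: t)).tail (x :: t).length
    rw [rightMins_tail, pdLoopA_cons, if_neg (lt_irrefl x), max_self]
    cases t with
    | nil =>
      rw [show rightMins ([] : List Int) = [] from rfl, pdScanB_nilr]
      rfl
    | cons w t' =>
      obtain ⟨m, r, hrm, hmem, hbd⟩ := rightMins_spec (w :: t') (by simp)
      have hrt : rmTail (w :: t') = r := by
        have h1 := rightMins_tail w t'
        rw [hrm] at h1
        simpa [rmTail] using h1.symm
      rw [hrm, pdScanB_cons, max_self]
      by_cases hs : x ≤ m
      · rw [if_pos hs]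
        rw [pdLoopA_fst _ _ _ _ _ (fun y hy => by
          have := le_trans hs (hbd y hy); omega)]
        norm_num
      · rw [if_neg hs]
        have := pdAB (w :: t') 1 0 x x (x :: w :: t').length
          (by simp; omega) (by norm_num) le_rfl ⟨m, hmem, by omega⟩
        rw [hrt] at this
        simpa using this
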